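-- pv_equiv track=rewrite | github.com/sanathharish/jarvis-ai | backend/agents/memory_agent.py | _cap_tokens
-- ===== SOURCE A (Python) =====
-- from typing import Dict, Any, List
--
-- def _cap_tokens(items: List[str], max_tokens: int = 800) -> List[str]:
--     # Approximate: 1 token ~= 1 word
--     count = 0
--     capped = []
--     for item in items:
--         words = item.split()
--         if count + len(words) > max_tokens:
--             break
--         capped.append(item)
--         count += len(words)
--     return capped
-- ===== SOURCE B (Python) =====
-- from typing import Dict, Any, List
-- from bisect import bisect_right
--
-- def _cap_tokens(items: List[str], max_tokens: int = 800) -> List[str]: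
--     # Build the inclusive prefix-sum table of word counts, then binary-search
--     # (bisect_right) for the cut index and slice.  Correct because word counts
--     # are non-negative, so the prefix sums are monotone non-decreasing and the
--     # first total exceeding max_tokens is exactly where A's loop breaks.
--     prefix = []
--     total = 0
--     for item in items:
--         total += len(item.split())
--         prefix.append(total)
--     return items[:bisect_right(prefix, max_tokens)]
-- ===== Notes on version B (the rewrite author's own statement) =====
-- stated objective: alternative
-- what changed: Instead of A's single scan that accumulates counts and breaks, B first materialises the inclusive prefix-sum table of word counts and then finds the cut index by binary search (bisect_right on the monotone table), returning the slice items[:k].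
import Mathlib
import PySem

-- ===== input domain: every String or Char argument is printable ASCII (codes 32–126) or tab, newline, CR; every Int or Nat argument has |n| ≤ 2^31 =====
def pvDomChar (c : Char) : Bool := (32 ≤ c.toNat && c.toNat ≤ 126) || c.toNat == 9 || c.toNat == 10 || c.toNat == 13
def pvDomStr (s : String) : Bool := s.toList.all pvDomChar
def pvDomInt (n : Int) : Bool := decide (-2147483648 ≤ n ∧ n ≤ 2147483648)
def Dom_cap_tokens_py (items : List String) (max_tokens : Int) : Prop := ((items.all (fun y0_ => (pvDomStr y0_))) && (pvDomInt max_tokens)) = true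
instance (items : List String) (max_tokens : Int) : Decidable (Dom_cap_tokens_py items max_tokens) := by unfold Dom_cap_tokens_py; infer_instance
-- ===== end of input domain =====

-- B replaces A's accumulate-and-break scan by a prefix-sum table plus binary search for the cut index (alternative strategy, same cost class).

-- ===== PORT A =====
def cap_tokens_py_go (items : List String) (count : Int) (capped : List String) (max_tokens : Int) : List String :=
  match items with
  | [] => capped.reverse
  | item :: rest =>
    let words := PySem.Str.split₀ item
    if count + (words.length : Int) > max_tokens then capped.reverse
    else cap_tokens_py_go rest (count + words.length) (item :: capped) max_tokens

def cap_tokens_py (items : List String) (max_tokens : Int) : List String :=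
  cap_tokens_py_go items 0 [] max_tokens

-- ===== PORT B =====
-- helper: build the inclusive prefix-sum table (B's first loop, appending to `prefix`)
def capAltPrefixGo (items : List String) (total : Int) (acc : List Int) : List Int :=
  match items with
  | [] => acc.reverse
  | item :: rest =>
    let t := total + ((PySem.Str.split₀ item).length : Int)
    capAltPrefixGo rest t (t :: acc)

-- helper: bisect.bisect_right ported by hand (while lo < hi: mid = (lo+hi)//2; …)
def capAltBisect (a : List Int) (x : Int) (lo hi : Nat) : Nat :=
  if lo < hi then
    let mid := (lo + hi) / 2
    if x < a.getD mid 0 then capAltBisect a x lo mid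
    else capAltBisect a x (mid + 1) hi
  else lo
termination_by hi - lo
decreasing_by all_goals omega

def cap_tokens_py_alt (items : List String) (max_tokens : Int) : List String :=
  let pfx := capAltPrefixGo items 0 []
  items.take (capAltBisect pfx max_tokens 0 pfx.length)

-- ===== PRECONDITION & SPEC =====
def Spec_cap_tokens_py (items : List String) (max_tokens : Int) (out : List String) : Prop := out = cap_tokens_py_alt items max_tokens
instance (items : List String) (max_tokens : Int) (out : List String) : Decidable (Spec_cap_tokens_py items max_tokens out) := by unfold Spec_cap_tokens_py; infer_instance

-- ===== CLAIM =====
def Claim_equal_cap_tokens_py : Prop := ∀ (items : List String) (max_tokens : Int), Dom_cap_tokens_py items max_tokens → Spec_cap_tokens_py items max_tokens (cap_tokens_py items max_tokens)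

-- ===== LEMMAS AND PROOFS =====

-- reference recursion for A's loop
def capSpec (items : List String) (count max_tokens : Int) : List String :=
  match items with
  | [] => []
  | item :: rest =>
    let w : Int := (PySem.Str.split₀ item).length
    if count + w > max_tokens then [] else item :: capSpec rest (count + w) max_tokens

theorem go_eq_spec (items : List String) (count : Int) (capped : List String) (max_tokens : Int) :
    cap_tokens_py_go items count capped max_tokens = capped.reverse ++ capSpec items count max_tokens := by
  induction items generalizing count capped with
  | nil => simp [cap_tokens_py_go, capSpec]
  | cons x xs ih =>
    simp only [cap_tokens_py_go, capSpec]
    split_ifs with h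
    · simp
    · rw [ih]; simp

-- plain (non-accumulator) prefix sums
def psums (items : List String) (total : Int) : List Int :=
  match items with
  | [] => []
  | item :: rest =>
    let t := total + ((PySem.Str.split₀ item).length : Int)
    t :: psums rest t

theorem prefixGo_eq (items : List String) (total : Int) (acc : List Int) :
    capAltPrefixGo items total acc = acc.reverse ++ psums items total := by
  induction items generalizing total acc with
  | nil => simp [capAltPrefixGo, psums]
  | cons x xs ih => simp [capAltPrefixGo, psums, ih]

theorem psums_ge (items : List String) (total : Int) : ∀ v ∈ psums items total, total ≤ v := by
  induction items generalizing total with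
  | nil => simp [psums]
  | cons x xs ih =>
    intro v hv
    simp only [psums, List.mem_cons] at hv
    rcases hv with h | h
    · omega
    · have := ih _ v h; omega

theorem psums_sorted (items : List String) (total : Int) :
    (psums items total).Pairwise (· ≤ ·) := by
  induction items generalizing total with
  | nil => simp [psums]
  | cons x xs ih =>
    simp only [psums, List.pairwise_cons]
    refine ⟨fun v hv => psums_ge _ _ v hv, ih _⟩

-- length of the ≤-prefix
def twLen (a : List Int) (x : Int) : Nat := (a.takeWhile (fun v => decide (v ≤ x))).length

theorem twLen_le_length (a : List Int) (x : Int) : twLen a x ≤ a.length := by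
  unfold twLen; exact (List.takeWhile_prefix _).length_le

theorem tw_le (a : List Int) (x : Int) : ∀ mid : Nat, mid < a.length → x < a.getD mid 0 → twLen a x ≤ mid := by
  induction a with
  | nil => intro mid h; simp at h
  | cons v rest ih =>
    intro mid hm hx
    cases mid with
    | zero =>
      have : ¬ v ≤ x := by simp [List.getD] at hx; omega
      simp [twLen, this]
    | succ k =>
      simp only [twLen, List.takeWhile_cons]
      by_cases hv : v ≤ x
      · simp only [hv, decide_true, if_true, List.length_cons]
        have := ih k (by simpa using hm) (by simpa [List.getD] using hx)
        unfold twLen at this; omega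
      · simp [hv]

theorem tw_ge (a : List Int) (x : Int) (hs : a.Pairwise (· ≤ ·)) :
    ∀ mid : Nat, mid < a.length → a.getD mid 0 ≤ x → mid < twLen a x := by
  induction a with
  | nil => intro mid h; simp at h
  | cons v rest ih =>
    intro mid hm hx
    rcases List.pairwise_cons.mp hs with ⟨hv, hrest⟩
    cases mid with
    | zero =>
      have hvx : v ≤ x := by simpa [List.getD] using hx
      simp [twLen, hvx]
    | succ k =>
      have hk : k < rest.length := by simpa using hm
      have hkx : rest.getD k 0 ≤ x := by simpa [List.getD] using hx
      have hvx : v ≤ x := by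
        have hmem : rest.getD k 0 ∈ rest := by
          rw [List.getD_eq_getElem _ _ hk]
          exact List.getElem_mem hk
        exact le_trans (hv _ hmem) hkx
      have := ih hrest k hk hkx
      simp only [twLen, List.takeWhile_cons, hvx, decide_true, if_true, List.length_cons]
      unfold twLen at this; omega

theorem bisect_eq (a : List Int) (x : Int) (hs : a.Pairwise (· ≤ ·)) (lo hi : Nat)
    (h1 : lo ≤ twLen a x) (h2 : twLen a x ≤ hi) (h3 : hi ≤ a.length) :
    capAltBisect a x lo hi = twLen a x := by
  rw [capAltBisect]
  by_cases hlt : lo < hi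
  · simp only [hlt, if_true]
    set mid := (lo + hi) / 2 with hmid
    have hmlt : mid < a.length := by omega
    by_cases hcmp : x < a.getD mid 0
    · simp only [hcmp, if_true]
      exact bisect_eq a x hs lo mid h1 (tw_le a x mid hmlt hcmp) (by omega)
    · simp only [hcmp, if_false]
      have := tw_ge a x hs mid hmlt (by omega)
      exact bisect_eq a x hs (mid + 1) hi (by omega) h2 h3
  · simp only [hlt, if_false]
    omega
termination_by hi - lo
decreasing_by all_goals omega

theorem take_twLen_eq (items : List String) (total max_tokens : Int) :
    items.take (twLen (psums items total) max_tokens) = capSpec items total max_tokens := by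
  induction items generalizing total with
  | nil => simp [capSpec]
  | cons x xs ih =>
    simp only [psums, capSpec, twLen, List.takeWhile_cons]
    by_cases h : total + ((PySem.Str.split₀ x).length : Int) ≤ max_tokens
    · have h' : ¬ total + ((PySem.Str.split₀ x).length : Int) > max_tokens := by omega
      simp only [h, decide_true, if_true, h', List.length_cons, List.take_succ_cons]
      rw [← ih]; rfl
    · have h' : total + ((PySem.Str.split₀ x).length : Int) > max_tokens := by omega
      simp [h, h']

-- ===== VERDICT =====
theorem cap_tokens_py_spec : Claim_equal_cap_tokens_py := by
  intro items max_tokens _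
  unfold Spec_cap_tokens_py cap_tokens_py cap_tokens_py_alt
  rw [go_eq_spec, prefixGo_eq]
  simp only [List.reverse_nil, List.nil_append]
  rw [bisect_eq (psums items 0) max_tokens (psums_sorted items 0) 0 (psums items 0).length
      (Nat.zero_le _) (twLen_le_length _ _) le_rfl]
  rw [take_twLen_eq]
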